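-- pv_equiv track=rewrite | github.com/vlad-bezden/data_structures_and_algorithms | data_structures_and_algorithms/subarray_with_maximum_minimum.py | calc_with_deque
-- ===== SOURCE A (Python) =====
-- from typing import List
-- from collections import namedtuple, deque
--
-- def calc_with_deque(data: List[int], size: int) -> int:
--     """
--     Performs O(n) solution
--     """
--     max_val = data[0]
--     d = deque([0])
--     for i, _ in enumerate(data):
--         if i - d[0] == size:
--             d.popleft()
--         while len(d) and data[d[-1]] >= data[i]:
--             d.pop()
--         d.append(i)
--         if i >= size:
--             max_val = max(max_val, data[d[0]])
--
--     return max_val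
-- ===== SOURCE B (Python) =====
-- def calc_with_deque(data, size):
--     """O(n*size) repeated scanning: max over sliding-window minimums."""
--     max_val = data[0]
--     for s in range(len(data) - size + 1):
--         max_val = max(max_val, min(data[s:s + size]))
--     return max_val
-- ===== Notes on version B (the rewrite author's own statement) =====
-- stated objective: simpler
-- what changed: Replaced the monotonic index deque with a direct scan that takes min(data[s:s+size]) for each window start and folds it into a running max seeded with data[0].
-- outside the precondition, e.g. on calc_with_deque([3, 1, 2], 0): A returns 3, B raises ValueError; on calc_with_deque([5, 2, 7], -2): A returns 5, B raises ValueError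
import Mathlib
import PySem

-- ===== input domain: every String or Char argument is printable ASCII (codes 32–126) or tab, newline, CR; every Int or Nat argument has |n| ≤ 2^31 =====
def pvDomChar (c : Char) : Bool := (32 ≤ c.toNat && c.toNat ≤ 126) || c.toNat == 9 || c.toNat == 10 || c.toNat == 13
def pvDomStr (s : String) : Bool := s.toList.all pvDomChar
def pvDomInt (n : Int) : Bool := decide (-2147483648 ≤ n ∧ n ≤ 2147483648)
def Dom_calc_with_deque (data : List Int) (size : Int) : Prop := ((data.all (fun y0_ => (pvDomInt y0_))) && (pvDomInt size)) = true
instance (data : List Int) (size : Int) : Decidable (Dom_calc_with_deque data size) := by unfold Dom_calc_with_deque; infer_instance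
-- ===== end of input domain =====

-- B replaces A's monotonic index deque by a direct per-window scan (min of each slice folded into a running max): simpler, same results on Pre_.

-- ===== PORT A =====
-- data[j] via Python indexing; the .getD 0 default only fires where Python would raise (excluded by Pre_)
def pvAt (data : List Int) (j : Int) : Int := (PySem.List.pyGet? data j).getD 0

-- the 'while len(d) and data[d[-1]] >= data[i]: d.pop()' loop
def pvPopLoop (data : List Int) (xi : Int) : List Nat → List Nat
  | [] => []
  | a :: rest =>
    if pvAt data (((a :: rest).getLast (List.cons_ne_nil a rest) : Nat) : Int) ≥ xi then
      pvPopLoop data xi ((a :: rest).dropLast)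
    else a :: rest
termination_by d => d.length
decreasing_by simp

-- one iteration of A's for-loop body; d[0] rendered as headI (A's deque is nonempty whenever Python reads d[0])
def pvStepA (data : List Int) (size : Int) (st : Int × List Nat) (i : Nat) : Int × List Nat :=
  let d0 := if (i : Int) - ((st.2.headI : Nat) : Int) = size then st.2.tail else st.2
  let d1 := pvPopLoop data (pvAt data (i : Int)) d0
  let d2 := d1 ++ [i]
  let m := if (i : Int) ≥ size then max st.1 (pvAt data ((d2.headI : Nat) : Int)) else st.1
  (m, d2)

def calc_with_deque (data : List Int) (size : Int) : Int :=
  ((List.range data.length).foldl (pvStepA data size) (pvAt data 0, [0])).1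

-- ===== PORT B =====
def calc_with_deque_alt (data : List Int) (size : Int) : Int :=
  (PySem.List.pyRange 0 ((data.length : Int) - size + 1) 1).foldl
    (fun m s => max m ((PySem.List.min? (PySem.List.slice data (some s) (some (s + size))) (fun y => y)).getD 0))
    ((PySem.List.pyGet? data 0).getD 0)

-- ===== PRECONDITION & SPEC =====
-- Pre_ restricts to the task's natural domain: data nonempty (A raises IndexError on []) and size ≥ 1
-- (for size ≤ 0 A still returns data[0], but B's min() of an empty window raises ValueError there).
def Pre_calc_with_deque (data : List Int) (size : Int) : Prop := data ≠ [] ∧ 1 ≤ size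
instance (data : List Int) (size : Int) : Decidable (Pre_calc_with_deque data size) := by unfold Pre_calc_with_deque; infer_instance

def pvWitness_calc_with_deque : List Int × Int := ([3, 1, 2], 2)

def Spec_calc_with_deque (data : List Int) (size : Int) (out : Int) : Prop := out = calc_with_deque_alt data size
instance (data : List Int) (size : Int) (out : Int) : Decidable (Spec_calc_with_deque data size out) := by unfold Spec_calc_with_deque; infer_instance

-- ===== CLAIM (what is proved, stated in full; the proofs are below) =====
def Claim_equal_calc_with_deque : Prop := ∀ (data : List Int) (size : Int), Dom_calc_with_deque data size → Pre_calc_with_deque data size → Spec_calc_with_deque data size (calc_with_deque data size)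

-- ===== LEMMAS AND PROOFS =====

-- abbreviation used throughout the proofs: the value at index j (0 outside range, never used there)
def gAt (data : List Int) (j : Nat) : Int := data.getD j 0

-- j survives in the deque after processing 0..i iff every later index in the window has a strictly larger value
def keepB (data : List Int) (i j : Nat) : Bool :=
  decide (∀ j' ∈ List.range' (j+1) (i - j), gAt data j < gAt data j')

-- the deque contents after iteration i, window lower bound lo
def cand (data : List Int) (lo i : Nat) : List Nat :=
  (List.range' lo (i + 1 - lo)).filter (keepB data i)

-- minimum of the window ending at i of width (at most) k
def wmin (data : List Int) (k i : Nat) : Int :=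
  ((PySem.List.min? ((List.range' (i+1-k) (i+1-(i+1-k))).map (gAt data)) (fun y => y)).getD 0)

-- A's running maximum after iteration i
def mA (data : List Int) (k i : Nat) : Int :=
  (List.range (i+1)).foldl (fun m j => if k ≤ j then max m (wmin data k j) else m) (data.getD 0 0)

theorem pvAt_natCast (data : List Int) (j : Nat) : pvAt data (j : Int) = gAt data j := by
  simp [pvAt, gAt, PySem.List.pyGet?_natCast, List.getD_eq_getElem?_getD]

theorem mem_cand {data : List Int} {lo i j : Nat} (h : j ∈ cand data lo i) :
    lo ≤ j ∧ j ≤ i ∧ keepB data i j = true := by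
  unfold cand at h
  have h1 := List.mem_filter.mp h
  have h2 := List.mem_range'_1.mp h1.1
  refine ⟨h2.1, ?_, h1.2⟩
  omega

theorem self_mem_cand (data : List Int) {lo i : Nat} (h : lo ≤ i) : i ∈ cand data lo i := by
  unfold cand
  refine List.mem_filter.mpr ⟨List.mem_range'_1.mpr ⟨h, by omega⟩, ?_⟩
  simp [keepB]

theorem cand_ne_nil (data : List Int) {lo i : Nat} (h : lo ≤ i) : cand data lo i ≠ [] :=
  List.ne_nil_of_mem (self_mem_cand data h)

theorem headI_mem_of_ne_nil {l : List Nat} (h : l ≠ []) : l.headI ∈ l := by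
  cases l with
  | nil => exact absurd rfl h
  | cons a t => simp

theorem pairwise_cand (data : List Int) (lo i : Nat) :
    (cand data lo i).Pairwise (fun a b => a < b ∧ gAt data a < gAt data b) := by
  unfold cand
  have h0 : (List.range' lo (i+1-lo)).Pairwise (· < ·) := List.pairwise_lt_range' 1
  refine (h0.filter (keepB data i)).imp_of_mem ?_
  intro a b ha hb hlt
  refine ⟨hlt, ?_⟩
  have hka := (List.mem_filter.mp ha).2
  have hbr := List.mem_range'_1.mp (List.mem_filter.mp hb).1
  have har := List.mem_range'_1.mp (List.mem_filter.mp ha).1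
  simp only [keepB, decide_eq_true_eq] at hka
  exact hka b (List.mem_range'_1.mpr ⟨by omega, by omega⟩)

theorem head_min (data : List Int) {lo i : Nat} (h : lo ≤ i) :
    ∀ j, lo ≤ j → j ≤ i → gAt data ((cand data lo i).headI) ≤ gAt data j := by
  have key : ∀ m j, i - j = m → lo ≤ j → j ≤ i →
      gAt data ((cand data lo i).headI) ≤ gAt data j := by
    intro m
    induction m using Nat.strong_induction_on with
    | _ m IH =>
      intro j hm hlo hij
      by_cases hkeep : keepB data i j = true
      · have hj : j ∈ cand data lo i :=
          List.mem_filter.mpr ⟨List.mem_range'_1.mpr ⟨hlo, by omega⟩, hkeep⟩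
        have hp := pairwise_cand data lo i
        cases hc : cand data lo i with
        | nil => rw [hc] at hj; exact absurd hj (by simp)
        | cons a t =>
          rw [hc] at hp hj
          simp only [List.headI]
          rcases List.mem_cons.mp hj with rfl | hjt
          · exact le_refl _
          · exact le_of_lt ((List.pairwise_cons.mp hp).1 j hjt).2
      · simp only [keepB, decide_eq_true_eq] at hkeep
        push Not at hkeep
        obtain ⟨j', hj'mem, hle⟩ := hkeep
        have hjr := List.mem_range'_1.mp hj'mem
        have h1 : gAt data ((cand data lo i).headI) ≤ gAt data j' :=
          IH (i - j') (by omega) j' rfl (by omega) (by omega)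
        exact le_trans h1 hle
  intro j
  exact key (i - j) j rfl

theorem wmin_eq_head (data : List Int) {k i : Nat} (hk : 1 ≤ k) :
    wmin data k i = gAt data ((cand data (i+1-k) i).headI) := by
  have hloi : i + 1 - k ≤ i := by omega
  have hhm : (cand data (i+1-k) i).headI ∈ cand data (i+1-k) i :=
    headI_mem_of_ne_nil (cand_ne_nil data hloi)
  obtain ⟨hl1, hl2, _⟩ := mem_cand hhm
  have hheadL : gAt data ((cand data (i+1-k) i).headI)
      ∈ (List.range' (i+1-k) (i+1-(i+1-k))).map (gAt data) :=
    List.mem_map_of_mem (List.mem_range'_1.mpr ⟨hl1, by omega⟩)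
  cases hm : PySem.List.min? ((List.range' (i+1-k) (i+1-(i+1-k))).map (gAt data)) (fun y => y) with
  | none =>
    have := (PySem.List.min?_eq_none_iff _ _).mp hm
    rw [this] at hheadL
    exact absurd hheadL (by simp)
  | some m =>
    have hmem := PySem.List.min?_mem hm
    have hmin := PySem.List.min?_isMin hm
    obtain ⟨j, hjr, rfl⟩ := List.mem_map.mp hmem
    have hjr' := List.mem_range'_1.mp hjr
    have h1 : gAt data ((cand data (i+1-k) i).headI) ≤ gAt data j :=
      head_min data hloi j hjr'.1 (by omega)
    have h2 : gAt data j ≤ gAt data ((cand data (i+1-k) i).headI) := hmin _ hheadL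
    unfold wmin
    rw [hm]
    exact (le_antisymm h2 h1).symm ▸ rfl

theorem cand_split (data : List Int) {lo i : Nat} (h : lo ≤ i) :
    cand data lo i = if keepB data i lo = true then lo :: cand data (lo+1) i
                     else cand data (lo+1) i := by
  unfold cand
  rw [show i+1-lo = (i-lo)+1 by omega, List.range'_succ,
      show i+1-(lo+1) = i-lo by omega]
  simp only [List.filter_cons]

theorem popleft_cand (data : List Int) {k : Nat} (hk : 1 ≤ k) (i : Nat) :
    (if ((i+1 : Nat) : Int) - (((cand data (i+1-k) i).headI : Nat) : Int) = (k : Int)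
     then (cand data (i+1-k) i).tail else (cand data (i+1-k) i)) = cand data (i+2-k) i := by
  by_cases hki : k ≤ i + 1
  · have hlo : i + 1 - k ≤ i := by omega
    have hsplit := cand_split data hlo
    have hi2 : i+2-k = (i+1-k)+1 := by omega
    rw [hi2]
    by_cases hkeep : keepB data i (i+1-k) = true
    · rw [hsplit, if_pos hkeep]
      rw [if_pos]
      · rfl
      · show ((i+1 : Nat) : Int) - (((i+1-k : Nat) : Nat) : Int) = (k : Int)
        omega
    · rw [hsplit, if_neg hkeep]
      rw [if_neg]
      have hne : cand data ((i+1-k)+1) i ≠ [] := by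
        have h2 := cand_ne_nil data hlo
        rw [hsplit, if_neg hkeep] at h2
        exact h2
      have hhm := headI_mem_of_ne_nil hne
      have := (mem_cand hhm).1
      omega
  · have h1 : i+1-k = 0 := by omega
    have h2 : i+2-k = 0 := by omega
    rw [h1, h2, if_neg]
    have hhm : (cand data 0 i).headI ∈ cand data 0 i :=
      headI_mem_of_ne_nil (cand_ne_nil data (by omega))
    have := (mem_cand hhm).2.1
    omega

theorem popLoop_filter (data : List Int) (x : Int) :
    ∀ d : List Nat, d.Pairwise (fun a b => gAt data a < gAt data b) →
      pvPopLoop data x d = d.filter (fun j => decide (gAt data j < x)) := by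
  have key : ∀ (n : Nat) (d : List Nat), d.length ≤ n →
      d.Pairwise (fun a b => gAt data a < gAt data b) →
      pvPopLoop data x d = d.filter (fun j => decide (gAt data j < x)) := by
    intro n
    induction n with
    | zero =>
      intro d hd _
      have : d = [] := by cases d with
        | nil => rfl
        | cons a t => simp at hd
      subst this
      simp [pvPopLoop]
    | succ n IH =>
      intro d hlen hp
      cases d with
      | nil => simp [pvPopLoop]
      | cons a rest =>
        rw [pvPopLoop]
        have hd : (a :: rest).dropLast ++ [(a :: rest).getLast (List.cons_ne_nil a rest)]
            = a :: rest := List.dropLast_append_getLast _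
        rw [pvAt_natCast]
        by_cases hc : gAt data ((a :: rest).getLast (List.cons_ne_nil a rest)) ≥ x
        · rw [if_pos hc]
          have hp' : (a :: rest).dropLast.Pairwise (fun a b => gAt data a < gAt data b) :=
            hp.sublist (List.dropLast_sublist _)
          rw [IH _ (by simp only [List.length_dropLast, List.length_cons] at hlen ⊢; omega) hp']
          conv_rhs => rw [← hd]
          rw [List.filter_append]
          have : decide (gAt data ((a :: rest).getLast (List.cons_ne_nil a rest)) < x) = false := by
            simp
            omega
          simp [this]
        · rw [if_neg hc]
          symm
          rw [List.filter_eq_self]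
          intro j hj
          have hx : gAt data ((a :: rest).getLast (List.cons_ne_nil a rest)) < x := by omega
          rw [← hd] at hj hp
          rw [List.pairwise_append] at hp
          rcases List.mem_append.mp hj with hj1 | hj2
          · have := hp.2.2 j hj1 ((a :: rest).getLast (List.cons_ne_nil a rest)) (by simp)
            simp
            omega
          · simp at hj2
            subst hj2
            simp
            omega
  intro d
  exact key d.length d (le_refl _)

theorem keepB_succ (data : List Int) {i j : Nat} (h : j ≤ i) :
    keepB data (i+1) j = (keepB data i j && decide (gAt data j < gAt data (i+1))) := by
  simp only [keepB]
  rw [show (i+1)-j = (i-j)+1 by omega, List.range'_concat,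
      show j+1+1*(i-j) = i+1 by omega]
  rw [← Bool.decide_and, decide_eq_decide]
  simp only [List.forall_mem_append, List.mem_range'_1, List.mem_singleton, and_imp,
    forall_eq]

theorem filter_append_cand (data : List Int) {lo i : Nat} (h : lo ≤ i + 1) :
    (cand data lo i).filter (fun j => decide (gAt data j < gAt data (i+1))) ++ [i+1]
      = cand data lo (i+1) := by
  unfold cand
  rw [List.filter_filter]
  rw [show i+1+1-lo = (i+1-lo)+1 by omega, List.range'_concat,
      show lo+1*(i+1-lo) = i+1 by omega, List.filter_append]
  congr 1
  · apply List.filter_congr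
    intro j hj
    have hjr := List.mem_range'_1.mp hj
    rw [keepB_succ data (show j ≤ i by omega), Bool.and_comm]
  · simp [keepB]

theorem pvStepA_cand (data : List Int) {k : Nat} (hk : 1 ≤ k) (i : Nat) :
    pvStepA data (k : Int) (mA data k i, cand data (i+1-k) i) (i+1)
      = (mA data k (i+1), cand data (i+1+1-k) (i+1)) := by
  unfold pvStepA
  dsimp only
  rw [popleft_cand data hk i]
  have hpw : (cand data (i+2-k) i).Pairwise (fun a b => gAt data a < gAt data b) :=
    (pairwise_cand data (i+2-k) i).imp (fun h => h.2)
  rw [pvAt_natCast data (i+1), popLoop_filter data _ _ hpw]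
  have h2 : i+2-k = i+1+1-k := by omega
  rw [h2, filter_append_cand data (show i+1+1-k ≤ i+1 by omega)]
  rw [pvAt_natCast]
  rw [← wmin_eq_head data hk]
  have hmAstep : mA data k (i+1)
      = if k ≤ i+1 then max (mA data k i) (wmin data k (i+1)) else mA data k i := by
    unfold mA
    rw [List.range_succ, List.foldl_append]
    simp only [List.foldl_cons, List.foldl_nil]
  rw [hmAstep]
  by_cases hc : k ≤ i+1
  · rw [if_pos (show ((i+1 : Nat) : Int) ≥ (k : Int) by exact_mod_cast hc), if_pos hc]
  · rw [if_neg (show ¬ ((i+1 : Nat) : Int) ≥ (k : Int) by exact_mod_cast hc), if_neg hc]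

theorem loopA_inv (data : List Int) {k : Nat} (hk : 1 ≤ k) (i : Nat) :
    (List.range (i+1)).foldl (pvStepA data (k : Int)) (pvAt data 0, [0])
      = (mA data k i, cand data (i+1-k) i) := by
  induction i with
  | zero =>
    rw [List.range_one]
    simp only [List.foldl_cons, List.foldl_nil]
    unfold pvStepA
    dsimp only
    rw [if_neg (show ¬ (((0 : Nat) : Int) - ((([0] : List Nat).headI : Nat) : Int) = (k : Int)) by
      simp; omega)]
    rw [pvPopLoop]
    rw [List.getLast_singleton]
    rw [if_pos (le_refl _)]
    rw [show ([0] : List Nat).dropLast = [] from rfl, pvPopLoop]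
    rw [if_neg (show ¬ (((0 : Nat) : Int) ≥ (k : Int)) by simp; omega)]
    have h00 : cand data (0+1-k) 0 = [0] := by
      unfold cand keepB
      rw [show 0+1-k = 0 by omega]
      simp
    have hm0 : mA data k 0 = data.getD 0 0 := by
      unfold mA
      rw [List.range_one]
      simp only [List.foldl_cons, List.foldl_nil]
      rw [if_neg (by omega)]
    rw [h00, hm0]
    have : pvAt data 0 = data.getD 0 0 := by
      rw [show (0 : Int) = ((0 : Nat) : Int) by simp, pvAt_natCast]
      rfl
    rw [this]
    simp
  | succ i IH =>
    rw [List.range_succ, List.foldl_append, IH]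
    simp only [List.foldl_cons, List.foldl_nil]
    exact pvStepA_cand data hk i

theorem calcA_eq_mA (data : List Int) {k : Nat} (hk : 1 ≤ k) (hne : data ≠ []) :
    calc_with_deque data (k : Int) = mA data k (data.length - 1) := by
  unfold calc_with_deque
  have hn : data.length = (data.length - 1) + 1 := by
    have := List.length_pos_iff.mpr hne
    omega
  rw [hn, loopA_inv data hk]
  simp

theorem foldl_if_lt (data : List Int) (k : Nat) :
    ∀ (l : List Nat) (a : Int), (∀ j ∈ l, j < k) →
      l.foldl (fun m j => if k ≤ j then max m (wmin data k j) else m) a = a := by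
  intro l
  induction l with
  | nil => intro a _; rfl
  | cons b t IH =>
    intro a h
    simp only [List.foldl_cons]
    rw [if_neg (by have := h b (by simp); omega)]
    exact IH a (fun j hj => h j (by simp [hj]))

theorem window_map (data : List Int) {s k : Nat} (h : s + k ≤ data.length) :
    (data.drop s).take k = (List.range' s k).map (gAt data) := by
  apply List.ext_getElem
  · simp
    omega
  · intro t h1 h2
    simp only [List.getElem_take, List.getElem_drop, List.getElem_map, List.getElem_range']
    unfold gAt
    rw [List.getD_eq_getElem?_getD, List.getElem?_eq_getElem (by simp at h1 ⊢; omega)]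
    simp only [Nat.one_mul]
    simp

theorem wmin_shift (data : List Int) (k s : Nat) (hk : 1 ≤ k) :
    wmin data k (s+k-1) = (PySem.List.min? ((List.range' s k).map (gAt data)) (fun y => y)).getD 0 := by
  unfold wmin
  rw [show s+k-1+1-k = s by omega]
  rw [show s+k-1+1-s = k by omega]

theorem calcB_eq_mA (data : List Int) {k : Nat} (hk : 1 ≤ k) (hne : data ≠ []) :
    calc_with_deque_alt data (k : Int) = mA data k (data.length - 1) := by
  have hn1 : 1 ≤ data.length := by have := List.length_pos_iff.mpr hne; omega
  have hseed : (PySem.List.pyGet? data 0).getD 0 = data.getD 0 0 := by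
    rw [show (0 : Int) = ((0 : Nat) : Int) by simp, PySem.List.pyGet?_natCast]
    simp [List.getD_eq_getElem?_getD]
  have hmA : mA data k (data.length - 1)
      = (List.range' k (data.length - k)).foldl (fun m j => max m (wmin data k j)) (data.getD 0 0) := by
    unfold mA
    rw [show data.length - 1 + 1 = data.length by omega]
    by_cases hkn : k ≤ data.length
    · rw [List.range_eq_range', show data.length = k + (data.length - k) by omega,
        ← List.range'_append]
      rw [List.foldl_append]
      rw [foldl_if_lt data k (List.range' 0 k) (data.getD 0 0) (by
        intro j hj
        have := List.mem_range'_1.mp hj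
        omega)]
      simp only [Nat.one_mul, Nat.zero_add]
      rw [show k + (data.length - k) - k = data.length - k by omega]
      apply PySem.List.foldl_congr_mem
      intro acc j hj
      have := List.mem_range'_1.mp hj
      rw [if_pos (by omega)]
    · rw [show data.length - k = 0 by omega]
      simp only [List.range'_zero, List.foldl_nil]
      rw [List.range_eq_range']
      exact foldl_if_lt data k _ _ (by
        intro j hj
        have := List.mem_range'_1.mp hj
        omega)
  unfold calc_with_deque_alt
  by_cases hkn : k ≤ data.length
  · have hbody : ∀ (acc : Int), ∀ s ∈ List.range (data.length - k + 1),
        (fun (m : Int) (s : Nat) => max m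
          ((PySem.List.min? (PySem.List.slice data (some ((0:Int) + (s : Int)))
            (some ((0:Int) + (s : Int) + (k : Int)))) (fun y => y)).getD 0)) acc s
        = max acc (wmin data k (s + k - 1)) := by
      intro acc s hs
      have hs' := List.mem_range.mp hs
      simp only [zero_add]
      rw [PySem.List.slice_natCast_add]
      rw [window_map data (show s + k ≤ data.length by omega)]
      rw [wmin_shift data k s hk]
    rw [PySem.List.pyRange_one, List.foldl_map,
      show (((data.length : Int) - (k : Int) + 1) - 0).toNat = data.length - k + 1 by omega]
    rw [PySem.List.foldl_congr_mem _ _ _ _ hbody]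
    rw [hseed, hmA]
    rw [List.range_eq_range', List.range'_succ]
    simp only [List.foldl_cons, Nat.zero_add]
    have h1 : wmin data k (k - 1) ≤ data.getD 0 0 := by
      rw [wmin_eq_head data hk]
      exact head_min data (show k-1+1-k ≤ k-1 by omega) 0 (by omega) (by omega)
    rw [max_eq_left h1]
    rw [show List.range' k (data.length - k)
          = (List.range' 1 (data.length - k)).map (fun s => (k-1) + s) by
        rw [List.map_add_range']
        congr 1
        omega]
    rw [List.foldl_map]
    apply PySem.List.foldl_congr_mem
    intro acc s hs
    rw [show s + k - 1 = (k-1) + s by omega]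
  · rw [PySem.List.pyRange_one_eq_nil (by omega)]
    simp only [List.foldl_nil]
    rw [hseed, hmA, show data.length - k = 0 by omega]
    simp

-- ===== VERDICT (by name: the statement is the Claim_ definition above) =====
theorem calc_with_deque_spec : Claim_equal_calc_with_deque := by
  intro data size _hdom hpre
  obtain ⟨hne, hsz⟩ := hpre
  have hk : size = ((size.toNat : Nat) : Int) := by omega
  have hk1 : 1 ≤ size.toNat := by omega
  unfold Spec_calc_with_deque
  rw [hk, calcA_eq_mA data hk1 hne, calcB_eq_mA data hk1 hne]
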